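-- pv_equiv track=rewrite | github.com/tamslo/pharme-study-result-analyses | modules/utils/anonymization.py | reveal_ehive_id
-- ===== SOURCE A (Python) =====
-- def reveal_ehive_id(
--     participant_map: dict[str, str],
--     participant_id: str,
-- ) -> str:
--     """Get the ehive ID from the anonymous participant ID. Use with caution."""
--     inverted_participant_map = {
--         participant_id: ehive_id
--         for ehive_id, participant_id in participant_map.items()
--     }
--     return inverted_participant_map[participant_id]
-- ===== SOURCE B (Python) =====
-- def reveal_ehive_id(
--     participant_map: dict[str, str],
--     participant_id: str,
-- ) -> str:
--     """Get the ehive ID from the anonymous participant ID. Use with caution."""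
--     # Scan the map back-to-front and return the first ehive ID whose mapped
--     # value is participant_id (= last write wins, like the dict inversion).
--     for ehive_id, mapped_id in reversed(participant_map.items()):
--         if mapped_id == participant_id:
--             return ehive_id
--     raise KeyError(participant_id)
-- ===== Notes on version B (the rewrite author's own statement) =====
-- stated objective: simpler
-- what changed: B drops the inverted-dict construction and instead scans the map's items in reverse, returning the first ehive_id mapped to participant_id (preserving last-write-wins), raising KeyError if none.
import Mathlib
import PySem

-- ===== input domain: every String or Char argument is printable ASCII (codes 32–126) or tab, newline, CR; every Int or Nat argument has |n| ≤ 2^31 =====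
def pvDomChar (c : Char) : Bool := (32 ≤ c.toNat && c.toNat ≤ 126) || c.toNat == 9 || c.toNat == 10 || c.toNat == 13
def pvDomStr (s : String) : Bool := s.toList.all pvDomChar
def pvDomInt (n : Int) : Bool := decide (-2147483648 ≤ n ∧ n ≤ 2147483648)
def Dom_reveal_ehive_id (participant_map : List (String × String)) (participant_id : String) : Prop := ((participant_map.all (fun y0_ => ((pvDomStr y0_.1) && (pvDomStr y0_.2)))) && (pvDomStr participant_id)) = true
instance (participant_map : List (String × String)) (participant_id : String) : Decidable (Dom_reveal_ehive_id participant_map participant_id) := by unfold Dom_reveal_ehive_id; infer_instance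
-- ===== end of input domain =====

-- B drops the inverted-dict construction and instead scans the items in reverse,
-- returning the first ehive_id mapped to participant_id (simpler; same last-write-wins value).

-- ===== PORT A =====
-- builds the inverted dict {pid: eid for eid, pid in participant_map.items()} and looks up;
-- under Pre_ the lookup succeeds, so the '.getD ""' default is never taken.
def reveal_ehive_id (participant_map : List (String × String)) (participant_id : String) : String :=
  let inverted_participant_map :=
    participant_map.foldl (fun d p => d.insert p.2 p.1) (PySem.Dict.empty (κ := String) (ν := String))
  (inverted_participant_map.get? participant_id).getD ""

-- ===== PORT B =====
-- scans reversed(participant_map.items()); under Pre_ a match exists, so the '""' branch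
-- (Python: raise KeyError) is never taken.
def reveal_ehive_id_alt (participant_map : List (String × String)) (participant_id : String) : String :=
  match participant_map.reverse.find? (fun p => p.2 == participant_id) with
  | some p => p.1
  | none => ""

-- ===== PRECONDITION & SPEC =====
-- A raises KeyError when participant_id is not among the mapped values; excluded here (B raises too).
def Pre_reveal_ehive_id (participant_map : List (String × String)) (participant_id : String) : Prop :=
  participant_id ∈ participant_map.map (·.2)
instance (participant_map : List (String × String)) (participant_id : String) : Decidable (Pre_reveal_ehive_id participant_map participant_id) := by unfold Pre_reveal_ehive_id; infer_instance
def pvWitness_reveal_ehive_id : (List (String × String)) × String := ([("e1", "p1"), ("e2", "p2")], "p2")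

def Spec_reveal_ehive_id (participant_map : List (String × String)) (participant_id : String) (out : String) : Prop := out = reveal_ehive_id_alt participant_map participant_id
instance (participant_map : List (String × String)) (participant_id : String) (out : String) : Decidable (Spec_reveal_ehive_id participant_map participant_id out) := by unfold Spec_reveal_ehive_id; infer_instance

-- ===== CLAIM (what is proved, stated in full; the proofs are below) =====
def Claim_equal_reveal_ehive_id : Prop := ∀ (participant_map : List (String × String)) (participant_id : String), Dom_reveal_ehive_id participant_map participant_id → Pre_reveal_ehive_id participant_map participant_id → Spec_reveal_ehive_id participant_map participant_id (reveal_ehive_id participant_map participant_id)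

-- ===== LEMMAS AND PROOFS =====

-- The inversion loop's lookup equals the last matching entry (first in the reversed scan).
theorem get?_foldl_invert (l : List (String × String)) (d : PySem.Dict String String) (k : String) :
    (l.foldl (fun d p => d.insert p.2 p.1) d).get? k =
      match l.reverse.find? (fun p => p.2 == k) with
      | some p => some p.1
      | none => d.get? k := by
  induction l generalizing d with
  | nil => simp
  | cons p t ih =>
    simp only [List.foldl_cons, List.reverse_cons, List.find?_append]
    rw [ih]
    cases h : t.reverse.find? (fun p => p.2 == k) with
    | some q => simp
    | none =>
      simp only [Option.none_or, List.find?_cons, List.find?_nil]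
      rw [PySem.Dict.get?_insert]
      by_cases hk : p.2 == k
      · simp [eq_of_beq hk]
      · have : ¬ k = p.2 := fun h' => hk (by simp [h'])
        simp [hk, this]

-- ===== VERDICT (by name: the statement is the Claim_ definition above) =====
theorem reveal_ehive_id_spec : Claim_equal_reveal_ehive_id := by
  intro m pid _ hpre
  unfold Spec_reveal_ehive_id reveal_ehive_id reveal_ehive_id_alt
  simp only []
  rw [get?_foldl_invert]
  cases h : m.reverse.find? (fun p => p.2 == pid) with
  | some q => simp
  | none =>
    exfalso
    obtain ⟨p, hp, hpk⟩ := List.mem_map.mp hpre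
    have : p ∈ m.reverse := List.mem_reverse.mpr hp
    have := List.find?_eq_none.mp h p this
    simp [hpk] at this
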